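-- pv_equiv track=rewrite | github.com/clarkngo/cs-courses | temp/07/modelserver-fastapi/main.py | genre_names_to_vector
-- ===== SOURCE A (Python) =====
-- def genre_names_to_vector(genres, num_genres=25):
--     genre_vector = [0] * num_genres
--     genre_indices = {
--         'Action': 0, 'Adventure': 1, 'Animation': 2, 'Biography': 3,
--         'Comedy': 4, 'Crime': 5, 'Documentary': 6, 'Drama': 7, 'Family': 8,
--         'Fantasy': 9, 'FilmNoir': 10, 'History': 11, 'Horror': 12, 'Music': 13,
--         'Musical': 14, 'Mystery': 15, 'Romance': 16, 'SciFi': 17, 'Short': 18,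
--         'Sport': 19, 'Thriller': 20, 'War': 21, 'Western': 22, 'Other': 23, 'Unknown': 24
--     }
--     for genre in genres:
--         if genre in genre_indices:
--             genre_vector[genre_indices[genre]] = 1
--     return genre_vector
-- ===== SOURCE B (Python) =====
-- def genre_names_to_vector(genres, num_genres=25):
--     genre_names = [
--         'Action', 'Adventure', 'Animation', 'Biography', 'Comedy', 'Crime',
--         'Documentary', 'Drama', 'Family', 'Fantasy', 'FilmNoir', 'History',
--         'Horror', 'Music', 'Musical', 'Mystery', 'Romance', 'SciFi', 'Short',
--         'Sport', 'Thriller', 'War', 'Western', 'Other', 'Unknown'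
--     ]
--     present = set(genres)
--     return [1 if i < len(genre_names) and genre_names[i] in present else 0
--             for i in range(num_genres)]
-- ===== Notes on version B (the rewrite author's own statement) =====
-- stated objective: alternative
-- what changed: B builds the output vector directly by a comprehension over range(num_genres), deciding each slot from a positional genre-name table and a set of the input, instead of A's allocate-then-mutate loop over the input genres with dict index lookups.
-- outside the precondition, e.g. on genre_names_to_vector(['Action'], 0): A raises IndexError, B returns []
import Mathlib
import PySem

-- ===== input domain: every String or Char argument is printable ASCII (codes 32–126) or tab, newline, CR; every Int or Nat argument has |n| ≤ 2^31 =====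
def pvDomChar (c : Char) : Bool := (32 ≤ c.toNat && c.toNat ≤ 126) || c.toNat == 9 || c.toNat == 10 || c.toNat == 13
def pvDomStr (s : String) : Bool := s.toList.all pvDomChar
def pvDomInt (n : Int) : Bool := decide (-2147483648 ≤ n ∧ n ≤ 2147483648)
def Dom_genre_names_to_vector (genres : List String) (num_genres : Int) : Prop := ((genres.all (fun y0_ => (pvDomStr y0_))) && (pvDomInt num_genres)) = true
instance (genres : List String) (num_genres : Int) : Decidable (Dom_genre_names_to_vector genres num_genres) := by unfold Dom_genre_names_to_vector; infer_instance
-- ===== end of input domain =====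

-- B builds the vector positionally: a comprehension over range(num_genres) deciding each
-- slot from a name table and a set of the input, instead of A's allocate-then-mutate loop
-- over the input with dict lookups (alternative; same cost).


-- ===== PORT A =====
-- the genre_indices dict literal of A
def genreItems : List (String × Int) :=
  [("Action", 0), ("Adventure", 1), ("Animation", 2), ("Biography", 3),
   ("Comedy", 4), ("Crime", 5), ("Documentary", 6), ("Drama", 7), ("Family", 8),
   ("Fantasy", 9), ("FilmNoir", 10), ("History", 11), ("Horror", 12), ("Music", 13),
   ("Musical", 14), ("Mystery", 15), ("Romance", 16), ("SciFi", 17), ("Short", 18),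
   ("Sport", 19), ("Thriller", 20), ("War", 21), ("Western", 22), ("Other", 23), ("Unknown", 24)]

def genreDict : PySem.Dict String Int := PySem.Dict.mk genreItems

-- for genre in genres: if genre in dict: vector[dict[genre]] = 1   (in-range writes by Pre_)
def genre_names_to_vector (genres : List String) (num_genres : Int) : List Int :=
  genres.foldl
    (fun vec g =>
      if genreDict.contains g then PySem.List.pySetD vec (genreDict.getD g 0) 1 else vec)
    (List.replicate num_genres.toNat 0)

-- ===== PORT B =====
-- B's positional genre-name table
def genreNames : List String :=
  ["Action", "Adventure", "Animation", "Biography", "Comedy", "Crime",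
   "Documentary", "Drama", "Family", "Fantasy", "FilmNoir", "History",
   "Horror", "Music", "Musical", "Mystery", "Romance", "SciFi", "Short",
   "Sport", "Thriller", "War", "Western", "Other", "Unknown"]

-- [1 if i < len(genre_names) and genre_names[i] in present else 0 for i in range(num_genres)]
-- ('x and y' ported as nested ifs; genre_names[i] is guarded in range, so pyGetD is exact here)
def genre_names_to_vector_alt (genres : List String) (num_genres : Int) : List Int :=
  let present : PySem.Set String := PySem.Set.ofList genres
  (PySem.List.pyRange 0 num_genres 1).map (fun i =>
    if i < (genreNames.length : Int) then
      (if PySem.Set.contains present (PySem.List.pyGetD genreNames i "") then 1 else 0)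
    else 0)

-- ===== PRECONDITION & SPEC =====
-- Pre_ excludes exactly the inputs where Python A raises IndexError: a recognised genre
-- in the input whose table index is not below num_genres.
def Pre_genre_names_to_vector (genres : List String) (num_genres : Int) : Prop :=
  ∀ p ∈ genreItems, p.1 ∈ genres → p.2 < num_genres
instance (genres : List String) (num_genres : Int) : Decidable (Pre_genre_names_to_vector genres num_genres) := by unfold Pre_genre_names_to_vector; infer_instance

def pvWitness_genre_names_to_vector : List String × Int := (["Action", "Drama", "Foo"], 25)

def Spec_genre_names_to_vector (genres : List String) (num_genres : Int) (out : List Int) : Prop := out = genre_names_to_vector_alt genres num_genres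
instance (genres : List String) (num_genres : Int) (out : List Int) : Decidable (Spec_genre_names_to_vector genres num_genres out) := by unfold Spec_genre_names_to_vector; infer_instance

-- ===== CLAIM (what is proved, stated in full; the proofs are below) =====
def Claim_equal_genre_names_to_vector : Prop := ∀ (genres : List String) (num_genres : Int), Dom_genre_names_to_vector genres num_genres → Pre_genre_names_to_vector genres num_genres → Spec_genre_names_to_vector genres num_genres (genre_names_to_vector genres num_genres)
-- ===== LEMMAS AND PROOFS =====

-- length of a "conditionally set one slot" fold is the initial length
theorem length_foldl_set {α : Type} (L : List α) (f : α → Bool) (g : α → Int) (vec : List Int) :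
    (L.foldl (fun v x => if f x then PySem.List.pySetD v (g x) 1 else v) vec).length = vec.length := by
  induction L generalizing vec with
  | nil => rfl
  | cons x L ih =>
    simp only [List.foldl_cons]
    split
    · rw [ih, PySem.List.length_pySetD]
    · exact ih vec

-- elementwise value of such a fold, for nonnegative write indices and an in-range slot
theorem getElem?_foldl_set {α : Type} (L : List α) (f : α → Bool) (g : α → Int)
    (h0 : ∀ x ∈ L, 0 ≤ g x) (vec : List Int) (m : Nat) (hm : m < vec.length) :
    (L.foldl (fun v x => if f x then PySem.List.pySetD v (g x) 1 else v) vec)[m]? =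
      if L.any (fun x => f x && g x == (m : Int)) then some 1 else vec[m]? := by
  induction L generalizing vec with
  | nil => simp
  | cons x L ih =>
    have hx : 0 ≤ g x := h0 x (List.mem_cons_self)
    have h0' : ∀ y ∈ L, 0 ≤ g y := fun y hy => h0 y (List.mem_cons_of_mem x hy)
    simp only [List.foldl_cons, List.any_cons]
    by_cases hfx : f x = true
    · simp only [hfx, if_pos, Bool.true_and]
      rw [PySem.List.pySetD_of_nonneg _ _ hx]
      by_cases heq : g x = (m : Int)
      · have hmn : (g x).toNat = m := by omega
        rw [ih h0' (vec.set (g x).toNat 1) (by simpa using hm)]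
        by_cases hany : L.any (fun y => f y && g y == (m : Int)) = true
        · simp [hany, heq]
        · simp only [hany, hmn]
          simp [hm, heq]
      · have hmn : (g x).toNat ≠ m := by omega
        rw [ih h0' _ (by simp [hm])]
        have : (g x == (m : Int)) = false := by simp [heq]
        simp [this, hmn]
    · simp only [Bool.not_eq_true] at hfx
      simp only [hfx, Bool.false_and, Bool.false_or]
      exact ih h0' vec hm

theorem genreDict_keys_nodup : genreDict.keys.Nodup := by decide

-- the A-side loop condition per slot, expressed over the dict items
theorem cond_eq (genres : List String) (m : Nat) :
    (genres.any (fun g => genreDict.contains g && genreDict.getD g 0 == (m : Int))) =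
      (genreItems.any (fun p =>
        PySem.Set.contains (PySem.Set.ofList genres) p.1 && p.2 == (m : Int))) := by
  rw [Bool.eq_iff_iff]
  simp only [List.any_eq_true, Bool.and_eq_true, beq_iff_eq]
  constructor
  · rintro ⟨g, hg, hc, hd⟩
    have hs : genreDict.get? g = some (genreDict.getD g 0) := by
      rw [PySem.Dict.contains_eq_isSome_get?] at hc
      cases h : genreDict.get? g with
      | none => rw [h] at hc; simp at hc
      | some v => rw [PySem.Dict.getD_of_get?_eq_some _ _ h]
    refine ⟨(g, genreDict.getD g 0), PySem.Dict.mem_items_of_get?_eq_some _ hs, ?_, hd⟩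
    simpa [PySem.Set.contains_iff, PySem.Set.mem_ofList]
  · rintro ⟨p, hp, hc, hd⟩
    have hget : genreDict.get? p.1 = some p.2 :=
      PySem.Dict.get?_of_mem_items _ (by simpa using hp) genreDict_keys_nodup
    refine ⟨p.1, ?_, ?_, ?_⟩
    · simpa [PySem.Set.contains_iff, PySem.Set.mem_ofList] using hc
    · rw [PySem.Dict.contains_eq_isSome_get?, hget]; rfl
    · rw [PySem.Dict.getD_of_get?_eq_some _ _ hget, hd]

theorem genreItems_nonneg : ∀ p ∈ genreItems, (0 : Int) ≤ p.2 := by decide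

-- the dict items are exactly the name table with its positions
theorem items_eq_zipIdx : genreItems = genreNames.zipIdx.map (fun p => (p.1, (p.2 : Int))) := by
  decide

-- the per-slot items condition, expressed positionally over genreNames
theorem items_any_eq (c : String → Bool) (m : Nat) :
    (genreItems.any (fun p => c p.1 && p.2 == (m : Int))) =
      (match genreNames[m]? with | some x => c x | none => false) := by
  rw [items_eq_zipIdx, List.any_map, Bool.eq_iff_iff]
  simp only [List.any_eq_true, Bool.and_eq_true, beq_iff_eq, Function.comp]
  constructor
  · rintro ⟨⟨x, i⟩, hmem, hc, hi⟩
    have hi' : i = m := by exact_mod_cast hi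
    subst hi'
    have : genreNames[i]? = some x := by
      simpa using (List.mk_mem_zipIdx_iff_getElem?).1 hmem
    simp [this, hc]
  · intro h
    cases hg : genreNames[m]? with
    | none => rw [hg] at h; exact absurd h (by simp)
    | some x =>
      rw [hg] at h
      exact ⟨(x, m), (List.mk_mem_zipIdx_iff_getElem?).2 (by simpa using hg), h, rfl⟩

-- ===== VERDICT (by name: the statement is the Claim_ definition above) =====
theorem genre_names_to_vector_spec : Claim_equal_genre_names_to_vector := by
  intro genres num_genres _ _
  show genre_names_to_vector genres num_genres = genre_names_to_vector_alt genres num_genres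
  simp only [genre_names_to_vector, genre_names_to_vector_alt]
  apply List.ext_getElem?
  intro m
  have hlenA := length_foldl_set genres (fun g => genreDict.contains g)
    (fun g => genreDict.getD g 0) (List.replicate num_genres.toNat (0 : Int))
  by_cases hm : m < num_genres.toNat
  · have hm' : m < (List.replicate num_genres.toNat (0 : Int)).length := by simpa using hm
    rw [getElem?_foldl_set genres (fun g => genreDict.contains g) (fun g => genreDict.getD g 0)
        (fun g _ => by
          show (0 : Int) ≤ genreDict.getD g 0
          cases h : genreDict.get? g with
          | none => rw [PySem.Dict.getD_of_get?_eq_none _ _ h]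
          | some v =>
            rw [PySem.Dict.getD_of_get?_eq_some _ _ h]
            exact genreItems_nonneg (g, v) (PySem.Dict.mem_items_of_get?_eq_some _ h)) _ m hm']
    rw [cond_eq, items_any_eq (fun s => PySem.Set.contains (PySem.Set.ofList genres) s) m]
    have hm2 : m < ((num_genres : Int) - 0).toNat := by omega
    rw [PySem.List.pyRange_one, List.map_map, List.getElem?_map, List.getElem?_range hm2]
    simp only [Option.map_some, Function.comp, zero_add]
    cases hg : genreNames[m]? with
    | none =>
      have h25 : ¬ (m < genreNames.length) := by
        simpa using (List.getElem?_eq_none_iff.1 hg)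
      have : ¬ ((m : Int) < (genreNames.length : Int)) := by exact_mod_cast h25
      simp [this, hm]
    | some x =>
      have h25 : m < genreNames.length := by
        by_contra hc
        rw [List.getElem?_eq_none_iff.2 (by omega)] at hg
        exact absurd hg (by simp)
      have h25' : ((m : Int) < (genreNames.length : Int)) := by exact_mod_cast h25
      have hgd : PySem.List.pyGetD genreNames (m : Int) "" = x := by
        rw [PySem.List.pyGetD_natCast]
        simp [List.getD, hg]
      rw [hgd] at *
      by_cases hx : x ∈ genres
      · simp [h25', hx, PySem.Set.mem_ofList]
      · simp [h25', hx, PySem.Set.mem_ofList, hm]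
  · rw [List.getElem?_eq_none (by rw [hlenA]; simpa using hm),
        List.getElem?_eq_none
          (by rw [List.length_map, PySem.List.length_pyRange_one]; omega)]
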